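-- pv_equiv track=rewrite | github.com/yannickloth/W33-Theory | tools/pocket_g2_extension.py | choose_silent
-- ===== SOURCE A (Python) =====
-- def choose_silent(pocket, mult):
--     # pick vertex of minimal internal degree
--     degs = {}
--     for v in pocket:
--         cnt = 0
--         for w in pocket:
--             if w == v:
--                 continue
--             if mult[v][w] is not None or mult[w][v] is not None:
--                 cnt += 1
--         degs[v] = cnt
--     return min(degs, key=lambda k: (degs[k], k))
-- ===== SOURCE B (Python) =====
-- def choose_silent(pocket, mult):
--     # pick vertex of minimal internal degree (pair-based symmetric accumulation)
--     degs = {v: 0 for v in pocket}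
--     rest = list(pocket)
--     while rest:
--         v = rest.pop(0)
--         for w in rest:
--             if w != v and (mult[v][w] is not None or mult[w][v] is not None):
--                 degs[v] += 1
--                 degs[w] += 1
--     return min(degs, key=lambda k: (degs[k], k))
-- ===== Notes on version B (the rewrite author's own statement) =====
-- stated objective: faster
-- what changed: Instead of recomputing a full inner scan of the pocket for every vertex, B seeds all degrees to 0 and makes a single pass over unordered non-self vertex pairs, incrementing both endpoints symmetrically when an edge is present.
-- outside the precondition, e.g. on choose_silent([1, 1, 0], {0: {1: 5}, 1: {0: 5, 1: None}}): A returns 1, B returns 0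
import Mathlib
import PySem

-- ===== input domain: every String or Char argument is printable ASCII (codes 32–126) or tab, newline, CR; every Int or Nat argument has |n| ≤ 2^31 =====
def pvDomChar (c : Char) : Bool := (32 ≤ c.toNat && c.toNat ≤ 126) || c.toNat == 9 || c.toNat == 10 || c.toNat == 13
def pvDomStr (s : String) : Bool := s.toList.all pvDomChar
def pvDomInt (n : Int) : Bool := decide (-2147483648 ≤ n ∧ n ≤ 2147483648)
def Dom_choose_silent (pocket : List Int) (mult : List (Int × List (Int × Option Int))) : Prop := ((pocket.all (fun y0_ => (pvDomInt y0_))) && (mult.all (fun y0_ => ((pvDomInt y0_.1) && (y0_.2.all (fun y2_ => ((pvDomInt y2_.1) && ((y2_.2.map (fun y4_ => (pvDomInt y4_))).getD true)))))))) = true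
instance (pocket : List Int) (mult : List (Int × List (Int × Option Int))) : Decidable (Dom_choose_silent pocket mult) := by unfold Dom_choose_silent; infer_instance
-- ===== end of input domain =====

-- B replaces A's per-vertex full inner scan by a single pass over unordered non-self pairs
-- that increments both endpoints (measured faster in a timing run; return value only).

-- ===== PORT A =====
-- shared lookup helpers: mult[v][w] with the dict lookups defaulted (total form; Pre_ guarantees presence)
def pvCell (mult : List (Int × List (Int × Option Int))) (v w : Int) : Option Int :=
  PySem.Dict.getD (PySem.Dict.mk (PySem.Dict.getD (PySem.Dict.mk mult) v [])) w none

-- 'mult[v][w] is not None or mult[w][v] is not None'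
def pvEdge (mult : List (Int × List (Int × Option Int))) (v w : Int) : Bool :=
  pvCell mult v w != none || pvCell mult w v != none

-- 'min(degs, key=lambda k: (degs[k], k))' (dict iteration = keys in insertion order); .getD 0 total form, empty dict = ValueError is outside Pre_
def pvMinKey (d : PySem.Dict Int Int) : Int :=
  (PySem.List.min2? d.keys (fun k => d.getD k 0) (fun k => k)).getD 0

def choose_silent (pocket : List Int) (mult : List (Int × List (Int × Option Int))) : Int :=
  let degs : PySem.Dict Int Int :=
    pocket.foldl (fun degs v =>
      let cnt : Int := pocket.foldl (fun cnt w =>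
        if w = v then cnt
        else if pvEdge mult v w then cnt + 1 else cnt) 0
      degs.insert v cnt) PySem.Dict.empty
  pvMinKey degs

-- ===== PORT B =====
-- 'degs = {v: 0 for v in pocket}'
def pvSeed (pocket : List Int) : PySem.Dict Int Int :=
  pocket.foldl (fun d v => d.insert v 0) PySem.Dict.empty

-- 'while rest: v = rest.pop(0); for w in rest: …' — each unordered non-self pair once, both endpoints bumped
def pvPairLoop (mult : List (Int × List (Int × Option Int))) :
    PySem.Dict Int Int → List Int → PySem.Dict Int Int
  | d, [] => d
  | d, v :: rest =>
      pvPairLoop mult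
        (rest.foldl (fun d w =>
          if w != v && pvEdge mult v w then (d.modify v 0 (· + 1)).modify w 0 (· + 1) else d) d)
        rest

def choose_silent_alt (pocket : List Int) (mult : List (Int × List (Int × Option Int))) : Int :=
  pvMinKey (pvPairLoop mult (pvSeed pocket) pocket)

-- ===== PRECONDITION & SPEC =====
-- Pre_ excludes (a) inputs where Python A raises: empty pocket (ValueError from min) and any
-- missing mult[v][w] lookup for distinct v, w in pocket (KeyError); and (b) pockets with
-- duplicate vertices, on which A's value-compare double loop counts neighbours once per
-- occurrence — an accidental per-occurrence weighting neither reading would specify.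
def Pre_choose_silent (pocket : List Int) (mult : List (Int × List (Int × Option Int))) : Prop :=
  pocket ≠ [] ∧ pocket.Nodup ∧
  ∀ v ∈ pocket, ∀ w ∈ pocket, v ≠ w →
    ((PySem.Dict.mk mult).get? v).isSome = true ∧
    ((PySem.Dict.mk (PySem.Dict.getD (PySem.Dict.mk mult) v [])).get? w).isSome = true

instance (pocket : List Int) (mult : List (Int × List (Int × Option Int))) : Decidable (Pre_choose_silent pocket mult) := by unfold Pre_choose_silent; infer_instance

def pvWitness_choose_silent : List Int × (List (Int × List (Int × Option Int))) :=
  ([0, 1], [(0, [(1, none)]), (1, [(0, some 2)])])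

def Spec_choose_silent (pocket : List Int) (mult : List (Int × List (Int × Option Int))) (out : Int) : Prop := out = choose_silent_alt pocket mult
instance (pocket : List Int) (mult : List (Int × List (Int × Option Int))) (out : Int) : Decidable (Spec_choose_silent pocket mult out) := by unfold Spec_choose_silent; infer_instance

-- ===== CLAIM (what is proved, stated in full; the proofs are below) =====
def Claim_equal_choose_silent : Prop := ∀ (pocket : List Int) (mult : List (Int × List (Int × Option Int))), Dom_choose_silent pocket mult → Pre_choose_silent pocket mult → Spec_choose_silent pocket mult (choose_silent pocket mult)

-- ===== LEMMAS AND PROOFS =====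

theorem cntA_eq_countP (mult : List (Int × List (Int × Option Int))) (pocket : List Int) (v : Int) :
    pocket.foldl (fun cnt w => if w = v then cnt else if pvEdge mult v w then cnt + 1 else cnt) (0 : Int)
      = ((pocket.countP (fun w => w ≠ v && pvEdge mult v w) : Nat) : Int) := by
  have h : (fun (cnt : Int) w => if w = v then cnt else if pvEdge mult v w then cnt + 1 else cnt)
      = (fun (cnt : Int) w => if (w ≠ v && pvEdge mult v w) = true then cnt + 1 else cnt) := by
    funext cnt w
    by_cases h1 : w = v <;> by_cases h2 : pvEdge mult v w <;> simp [h1, h2]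
  rw [h, PySem.List.foldl_count_if, zero_add]

theorem itemsA (mult : List (Int × List (Int × Option Int))) (pocket : List Int) (hnd : pocket.Nodup) :
    (pocket.foldl (fun degs v =>
      degs.insert v (pocket.foldl (fun cnt w =>
        if w = v then cnt else if pvEdge mult v w then cnt + 1 else cnt) (0 : Int)))
      PySem.Dict.empty).items
    = pocket.map (fun v => (v, ((pocket.countP (fun w => w ≠ v && pvEdge mult v w) : Nat) : Int))) := by
  have h := PySem.Dict.items_foldl_insert_fresh (l := pocket) (k := fun a => a)
    (v := fun a => pocket.foldl (fun cnt w =>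
        if w = a then cnt else if pvEdge mult a w then cnt + 1 else cnt) (0 : Int))
    (d := PySem.Dict.empty)
    (by intro a _; simp [PySem.Dict.contains_empty]) (by simpa using hnd)
  rw [h]
  simp [cntA_eq_countP, PySem.Dict.empty]

theorem countP_single_key (p : Int → Bool) :
    ∀ (ws : List Int) (x : Int), ws.Nodup → x ∈ ws →
      ws.countP (fun w => w = x && p w) = if p x then 1 else 0 := by
  intro ws
  induction ws with
  | nil => intro x _ hx; simp at hx
  | cons w ws ih =>
    intro x hnd hx
    rcases List.mem_cons.mp hx with hxw | hxm
    · subst hxw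
      have h0 : ws.countP (fun w' => w' = x && p w') = 0 :=
        List.countP_eq_zero.mpr (by
          intro a ha
          have : a ≠ x := fun h => (List.nodup_cons.mp hnd).1 (h ▸ ha)
          simp [this])
      simp [List.countP_cons, h0]
    · have hwx : w ≠ x := fun h => (List.nodup_cons.mp hnd).1 (h ▸ hxm)
      simp [ih x (List.nodup_cons.mp hnd).2 hxm, hwx]

theorem getD_inner (mult : List (Int × List (Int × Option Int))) (v : Int) :
    ∀ (ws : List Int) (d : PySem.Dict Int Int) (x : Int),
      (ws.foldl (fun d w =>
          if w != v && pvEdge mult v w then (d.modify v 0 (· + 1)).modify w 0 (· + 1) else d) d).getD x 0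
        = d.getD x 0
          + (if x = v then ((ws.countP (fun w => w ≠ v && pvEdge mult v w) : Nat) : Int) else 0)
          + ((ws.countP (fun w => w = x && (w ≠ v && pvEdge mult v w)) : Nat) : Int) := by
  intro ws
  induction ws with
  | nil => intro d x; simp
  | cons w ws ih =>
    intro d x
    simp only [List.foldl_cons, List.countP_cons, ih]
    by_cases he : (w != v && pvEdge mult v w) = true
    · have he' : w ≠ v ∧ pvEdge mult v w = true := by simpa using he
      rw [if_pos he]
      simp only [PySem.Dict.getD_modify]
      rcases eq_or_ne x w with hxw | hxw <;> rcases eq_or_ne x v with hxv | hxv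
      · exact absurd (hxw.symm.trans hxv) he'.1
      · subst hxw; simp [hxv, he'.1, he'.2]; omega
      · subst hxv; simp [hxw, Ne.symm hxw, he'.1, he'.2]; omega
      · simp [hxw, Ne.symm hxw, hxv, he'.1, he'.2]
    · have he' : ¬(w ≠ v ∧ pvEdge mult v w = true) := by simpa using he
      rw [if_neg he]
      simp [he']

theorem getD_pairLoop_notMem (mult : List (Int × List (Int × Option Int))) :
    ∀ (l : List Int) (d : PySem.Dict Int Int) (x : Int), x ∉ l →
      (pvPairLoop mult d l).getD x 0 = d.getD x 0 := by
  intro l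
  induction l with
  | nil => intro d x _; rfl
  | cons v ws ih =>
    intro d x hx
    have hxv : x ≠ v := fun h => hx (h ▸ List.mem_cons_self)
    have hxm : x ∉ ws := fun h => hx (List.mem_cons_of_mem _ h)
    simp only [pvPairLoop, ih _ x hxm, getD_inner, hxv]
    simp
    intro a ha hax
    exact absurd (hax ▸ ha) hxm

theorem getD_pairLoop_mem (mult : List (Int × List (Int × Option Int))) :
    ∀ (l : List Int) (d : PySem.Dict Int Int) (x : Int), l.Nodup → x ∈ l →
      (pvPairLoop mult d l).getD x 0
        = d.getD x 0 + ((l.countP (fun w => w ≠ x && pvEdge mult x w) : Nat) : Int) := by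
  intro l
  induction l with
  | nil => intro d x _ hx; simp at hx
  | cons v ws ih =>
    intro d x hnd hx
    have hvm : v ∉ ws := (List.nodup_cons.mp hnd).1
    have hndw : ws.Nodup := (List.nodup_cons.mp hnd).2
    rcases List.mem_cons.mp hx with hxv | hxm
    · subst hxv
      -- x = v: the head step counts all its edges, the tail never touches x again
      simp only [pvPairLoop, getD_pairLoop_notMem mult ws _ x hvm, getD_inner]
      simp [List.countP_cons]
      intro a ha hax hax'
      exact absurd hax hax'
    · have hxv : x ≠ v := fun h => hvm (h ▸ hxm)
      simp only [pvPairLoop, ih _ x hndw hxm, getD_inner, hxv]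
      rw [countP_single_key (fun w => w ≠ v && pvEdge mult v w) ws x hndw hxm]
      simp only [List.countP_cons]
      have hsym : pvEdge mult x v = pvEdge mult v x := by simp [pvEdge, Bool.or_comm]
      by_cases he : pvEdge mult v x <;> simp [he, hxv, Ne.symm hxv, hsym] <;> omega

theorem keys_inner (mult : List (Int × List (Int × Option Int))) (v : Int) :
    ∀ (ws : List Int) (d : PySem.Dict Int Int), v ∈ d.keys → (∀ w ∈ ws, w ∈ d.keys) →
      (ws.foldl (fun d w =>
          if w != v && pvEdge mult v w then (d.modify v 0 (· + 1)).modify w 0 (· + 1) else d) d).keys = d.keys := by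
  intro ws
  induction ws with
  | nil => intro d _ _; rfl
  | cons w ws ih =>
    intro d hv hw
    have hkeys : ((if w != v && pvEdge mult v w then (d.modify v 0 (· + 1)).modify w 0 (· + 1) else d)).keys = d.keys := by
      by_cases he : (w != v && pvEdge mult v w) = true
      · rw [if_pos he, PySem.Dict.keys_modify, PySem.Dict.keys_insert_of_contains, PySem.Dict.keys_modify,
            PySem.Dict.keys_insert_of_contains]
        · rw [PySem.Dict.contains_iff_mem_keys]; exact hv
        · rw [PySem.Dict.contains_modify]
          rcases eq_or_ne w v with h | h
          · simp [h]
          · have hcw : d.contains w = true := by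
              rw [PySem.Dict.contains_iff_mem_keys]; exact hw w List.mem_cons_self
            simp [hcw]
      · rw [if_neg he]
    simp only [List.foldl_cons]
    rw [ih _ (by rw [hkeys]; exact hv) (by rw [hkeys]; exact fun a ha => hw a (List.mem_cons_of_mem _ ha)), hkeys]

theorem keys_pairLoop (mult : List (Int × List (Int × Option Int))) :
    ∀ (l : List Int) (d : PySem.Dict Int Int), (∀ x ∈ l, x ∈ d.keys) →
      (pvPairLoop mult d l).keys = d.keys := by
  intro l
  induction l with
  | nil => intro d _; rfl
  | cons v ws ih =>
    intro d h
    have hkeys := keys_inner mult v ws d (h v List.mem_cons_self) (fun a ha => h a (List.mem_cons_of_mem _ ha))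
    simp only [pvPairLoop]
    rw [ih _ (by rw [hkeys]; exact fun a ha => h a (List.mem_cons_of_mem _ ha)), hkeys]

theorem seed_items (pocket : List Int) (hnd : pocket.Nodup) :
    (pvSeed pocket).items = pocket.map (fun v => (v, (0 : Int))) := by
  unfold pvSeed
  rw [PySem.Dict.items_foldl_insert_fresh pocket (fun a => a) (fun _ => 0) PySem.Dict.empty
    (by intro a _; simp [PySem.Dict.contains_empty]) (by simpa using hnd)]
  simp [PySem.Dict.empty]

theorem seed_keys (pocket : List Int) (hnd : pocket.Nodup) : (pvSeed pocket).keys = pocket := by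
  simp only [PySem.Dict.keys, seed_items pocket hnd]
  simp [Function.comp_def]

theorem dict_eq (mult : List (Int × List (Int × Option Int))) (pocket : List Int) (hnd : pocket.Nodup) :
    (pocket.foldl (fun degs v =>
      degs.insert v (pocket.foldl (fun cnt w =>
        if w = v then cnt else if pvEdge mult v w then cnt + 1 else cnt) (0 : Int)))
      PySem.Dict.empty)
    = pvPairLoop mult (pvSeed pocket) pocket := by
  apply PySem.Dict.ext
  have hkeysB : (pvPairLoop mult (pvSeed pocket) pocket).keys = pocket := by
    rw [keys_pairLoop mult pocket (pvSeed pocket) (by rw [seed_keys pocket hnd]; exact fun a ha => ha),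
        seed_keys pocket hnd]
  have hgetD : ∀ x ∈ pocket, (pvPairLoop mult (pvSeed pocket) pocket).getD x 0
      = ((pocket.countP (fun w => w ≠ x && pvEdge mult x w) : Nat) : Int) := by
    intro x hx
    rw [getD_pairLoop_mem mult pocket (pvSeed pocket) x hnd hx]
    have h0 : (pvSeed pocket).getD x 0 = 0 := by
      apply PySem.Dict.getD_of_mem_items
      · rw [seed_items pocket hnd]; exact List.mem_map.mpr ⟨x, hx, rfl⟩
      · rw [seed_keys pocket hnd]; exact hnd
    rw [h0, zero_add]
  rw [itemsA mult pocket hnd,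
      PySem.Dict.items_eq_map_keys (pvPairLoop mult (pvSeed pocket) pocket) (by rw [hkeysB]; exact hnd) 0,
      hkeysB]
  exact (List.map_congr_left (fun a ha => by rw [hgetD a ha])).symm

-- ===== VERDICT (by name: the statement is the Claim_ definition above) =====
theorem choose_silent_spec : Claim_equal_choose_silent := by
  intro pocket mult _hdom hpre
  unfold Spec_choose_silent
  show choose_silent pocket mult = choose_silent_alt pocket mult
  simp only [choose_silent, choose_silent_alt]
  rw [dict_eq mult pocket hpre.2.1]
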